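-- pv_equiv track=rewrite | github.com/faizallmaullana/deteksi-kendaraan | streamlit.py | check_plate_match
-- ===== SOURCE A (Python) =====
-- def check_plate_match(ocr_text, known_plates):
--     max_match_len = 0
--     for plate in known_plates:
--         for i in range(len(ocr_text)):
--             for j in range(i, len(ocr_text)):
--                 substring = ocr_text[i:j+1]
--                 if substring in plate and len(substring) > max_match_len:
--                     max_match_len = len(substring)
--     return max_match_len
-- ===== SOURCE B (Python) =====
-- def check_plate_match(ocr_text, known_plates):
--     def cpl(a, b):
--         n = 0
--         while n < len(a) and n < len(b) and a[n] == b[n]: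
--             n += 1
--         return n
--     best = 0
--     for plate in known_plates:
--         for i in range(len(ocr_text)):
--             for k in range(len(plate)):
--                 best = max(best, cpl(ocr_text[i:], plate[k:]))
--     return best
-- ===== Notes on version B (the rewrite author's own statement) =====
-- stated objective: faster
-- what changed: Instead of enumerating every substring ocr_text[i:j+1] and running a containment scan of the plate for each (O(P*n^3*m)), B computes for every pair of start positions (i in ocr_text, k in plate) the length of the common prefix of the two suffixes and takes the global maximum, which is the longest common substring (O(P*n*m*L)).
import Mathlib
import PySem

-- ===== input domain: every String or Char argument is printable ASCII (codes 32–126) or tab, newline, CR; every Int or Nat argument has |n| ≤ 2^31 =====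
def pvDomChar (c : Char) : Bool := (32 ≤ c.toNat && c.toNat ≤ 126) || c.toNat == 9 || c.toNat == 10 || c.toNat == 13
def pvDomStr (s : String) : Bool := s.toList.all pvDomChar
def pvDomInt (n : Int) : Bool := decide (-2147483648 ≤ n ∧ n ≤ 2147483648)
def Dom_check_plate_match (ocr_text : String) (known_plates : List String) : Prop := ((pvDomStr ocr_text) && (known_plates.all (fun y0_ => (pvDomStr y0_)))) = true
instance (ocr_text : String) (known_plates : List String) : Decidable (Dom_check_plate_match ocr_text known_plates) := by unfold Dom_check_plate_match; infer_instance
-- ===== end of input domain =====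

-- B replaces A's enumerate-every-substring-and-scan search by a common-prefix-of-suffixes
-- maximisation over all start-position pairs (same longest-common-substring value, asymptotically faster).


-- ===== PORT A =====
def check_plate_match (ocr_text : String) (known_plates : List String) : Int :=
  known_plates.foldl (fun max_match_len plate =>
    (PySem.List.pyRange 0 (PySem.Str.len ocr_text) 1).foldl (fun max_match_len i =>
      (PySem.List.pyRange i (PySem.Str.len ocr_text) 1).foldl (fun max_match_len j =>
        let substring := PySem.Str.slice ocr_text (some i) (some (j + 1))
        if PySem.Str.isIn substring plate = true ∧ PySem.Str.len substring > max_match_len then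
          PySem.Str.len substring
        else max_match_len) max_match_len) max_match_len) 0

-- ===== PORT B =====
-- Source B's helper cpl(a, b): length of the longest common prefix of two strings (here: char lists)
def pvCpl : List Char → List Char → Int
  | a :: as, b :: bs => if a = b then pvCpl as bs + 1 else 0
  | _, _ => 0

def check_plate_match_alt (ocr_text : String) (known_plates : List String) : Int :=
  known_plates.foldl (fun best plate =>
    (PySem.List.pyRange 0 (PySem.Str.len ocr_text) 1).foldl (fun best i =>
      (PySem.List.pyRange 0 (PySem.Str.len plate) 1).foldl (fun best k =>
        max best (pvCpl (PySem.List.slice ocr_text.toList (some i) none)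
                        (PySem.List.slice plate.toList (some k) none))) best) best) 0

-- ===== PRECONDITION & SPEC =====
def Spec_check_plate_match (ocr_text : String) (known_plates : List String) (out : Int) : Prop := out = check_plate_match_alt ocr_text known_plates
instance (ocr_text : String) (known_plates : List String) (out : Int) : Decidable (Spec_check_plate_match ocr_text known_plates out) := by unfold Spec_check_plate_match; infer_instance

-- ===== CLAIM (what is proved, stated in full; the proofs are below) =====
def Claim_equal_check_plate_match : Prop := ∀ (ocr_text : String) (known_plates : List String), Dom_check_plate_match ocr_text known_plates → Spec_check_plate_match ocr_text known_plates (check_plate_match ocr_text known_plates)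

-- ===== LEMMAS AND PROOFS =====

-- generic toolkit for "inflationary" folds (both ports are nested max-accumulating folds)
theorem pvFoldLe {α : Type} (l : List α) (f : Int → α → Int) (C : Int)
    (hstep : ∀ acc x, x ∈ l → acc ≤ C → f acc x ≤ C) :
    ∀ a, a ≤ C → l.foldl f a ≤ C := by
  induction l with
  | nil => intro a ha; simpa using ha
  | cons y ys ih =>
    intro a ha
    simp only [List.foldl_cons]
    exact ih (fun acc x hx h => hstep acc x (List.mem_cons_of_mem _ hx) h) _
      (hstep a y (List.mem_cons_self) ha)

theorem pvFoldInfl {α : Type} (l : List α) (f : Int → α → Int)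
    (hstep : ∀ acc x, x ∈ l → acc ≤ f acc x) :
    ∀ a, a ≤ l.foldl f a := by
  induction l with
  | nil => intro a; simp
  | cons y ys ih =>
    intro a
    simp only [List.foldl_cons]
    exact le_trans (hstep a y List.mem_cons_self)
      (ih (fun acc x hx => hstep acc x (List.mem_cons_of_mem _ hx)) _)

theorem pvFoldMem {α : Type} (l : List α) (f : Int → α → Int)
    (hstep : ∀ acc x, x ∈ l → acc ≤ f acc x) {x : α} (hx : x ∈ l) {v : Int}
    (hv : ∀ acc, v ≤ f acc x) : ∀ a, v ≤ l.foldl f a := by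
  induction l with
  | nil => cases hx
  | cons y ys ih =>
    intro a
    simp only [List.foldl_cons]
    rcases List.mem_cons.mp hx with rfl | hx'
    · exact le_trans (hv a)
        (pvFoldInfl ys f (fun acc z hz => hstep acc z (List.mem_cons_of_mem _ hz)) _)
    · exact ih (fun acc z hz => hstep acc z (List.mem_cons_of_mem _ hz)) hx' _

-- facts about pvCpl
theorem pvCpl_nonneg (x y : List Char) : 0 ≤ pvCpl x y := by
  induction x generalizing y with
  | nil => simp [pvCpl]
  | cons a as ih =>
    cases y with
    | nil => simp [pvCpl]
    | cons b bs =>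
      by_cases h : a = b
      · have := ih bs; simp [pvCpl, h]; omega
      · simp [pvCpl, h]

theorem pvCpl_le_lengths (x y : List Char) :
    pvCpl x y ≤ (x.length : Int) ∧ pvCpl x y ≤ (y.length : Int) := by
  induction x generalizing y with
  | nil => simp [pvCpl]
  | cons a as ih =>
    cases y with
    | nil => simp [pvCpl]; positivity
    | cons b bs =>
      by_cases h : a = b
      · have := ih bs; simp [pvCpl, h]; omega
      · simp [pvCpl, h]; constructor <;> positivity

theorem pvCpl_lower (L : Nat) :
    ∀ (x y : List Char), L ≤ x.length → L ≤ y.length → x.take L = y.take L →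
    (L : Int) ≤ pvCpl x y := by
  induction L with
  | zero => intro x y _ _ _; simpa using pvCpl_nonneg x y
  | succ L ih =>
    intro x y hx hy htake
    cases x with
    | nil => simp at hx
    | cons a as =>
      cases y with
      | nil => simp at hy
      | cons b bs =>
        simp only [List.take_succ_cons, List.cons.injEq] at htake
        obtain ⟨rfl, htake'⟩ := htake
        simp only [List.length_cons] at hx hy
        have := ih as bs (by omega) (by omega) htake'
        simp [pvCpl]; omega

theorem pvCpl_take_eq (x y : List Char) :
    x.take (pvCpl x y).toNat = y.take (pvCpl x y).toNat := by
  induction x generalizing y with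
  | nil => simp [pvCpl]
  | cons a as ih =>
    cases y with
    | nil => simp [pvCpl]
    | cons b bs =>
      by_cases h : a = b
      · have hnn := pvCpl_nonneg as bs
        have : (pvCpl as bs + 1).toNat = (pvCpl as bs).toNat + 1 := by omega
        simp [pvCpl, h, this, ih bs]
      · simp [pvCpl, h]

-- infix ↔ a prefix of some suffix, with bounds
theorem pv_infix_drop {sub q : List Char} (h : sub <:+: q) :
    ∃ k, k + sub.length ≤ q.length ∧ (q.drop k).take sub.length = sub := by
  obtain ⟨s, t, rfl⟩ := h
  refine ⟨s.length, by simp, ?_⟩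
  rw [show s ++ sub ++ t = s ++ (sub ++ t) by simp, List.drop_left, List.take_left]

theorem pv_drop_take_infix (q : List Char) (k L : Nat)
    (sub : List Char) (hsub : sub = (q.drop k).take L) :
    sub <:+: q :=
  hsub ▸ (List.IsPrefix.isInfix (List.take_prefix _ _)).trans
    (List.IsSuffix.isInfix (List.drop_suffix _ _))

-- the substring ocr_text[i:j+1] as a take/drop of the char list (natural indices)
theorem pv_subList (s : String) (a b : Nat) :
    (PySem.Str.slice s (some (a : Int)) (some ((b : Int) + 1))).toList =
      (s.toList.drop a).take (b + 1 - a) := by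
  have h0 : (PySem.Str.slice s (some (a : Int)) (some ((b : Int) + 1))).toList
      = PySem.List.slice s.toList (some (a : Int)) (some ((b : Int) + 1)) := by
    simp [PySem.Str.slice]
  have h1 : ((b : Int) + 1) = ((b + 1 : Nat) : Int) := by push_cast; ring
  rw [h0, h1, PySem.List.slice_natCast]

-- A's innermost step is inflationary in the accumulator
theorem pvA_step_infl (ocr_text plate : String) (i j acc : Int) :
    acc ≤ (let substring := PySem.Str.slice ocr_text (some i) (some (j + 1))
           if PySem.Str.isIn substring plate = true ∧ PySem.Str.len substring > acc then
             PySem.Str.len substring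
           else acc) := by
  dsimp only
  split_ifs with h
  · exact le_of_lt h.2
  · exact le_refl _

theorem pvA_jfold_infl (ocr_text plate : String) (i acc : Int) :
    acc ≤ (PySem.List.pyRange i (PySem.Str.len ocr_text) 1).foldl (fun max_match_len j =>
      let substring := PySem.Str.slice ocr_text (some i) (some (j + 1))
      if PySem.Str.isIn substring plate = true ∧ PySem.Str.len substring > max_match_len then
        PySem.Str.len substring
      else max_match_len) acc :=
  pvFoldInfl _ _ (fun acc' j _ => pvA_step_infl ocr_text plate i j acc') acc

theorem pvA_infl (ocr_text plate : String) (acc : Int) :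
    acc ≤ (PySem.List.pyRange 0 (PySem.Str.len ocr_text) 1).foldl (fun max_match_len i =>
      (PySem.List.pyRange i (PySem.Str.len ocr_text) 1).foldl (fun max_match_len j =>
        let substring := PySem.Str.slice ocr_text (some i) (some (j + 1))
        if PySem.Str.isIn substring plate = true ∧ PySem.Str.len substring > max_match_len then
          PySem.Str.len substring
        else max_match_len) max_match_len) acc :=
  pvFoldInfl _ _ (fun acc' i _ => pvA_jfold_infl ocr_text plate i acc') acc

theorem pvA_nonneg (ocr_text : String) (known_plates : List String) :
    0 ≤ check_plate_match ocr_text known_plates := by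
  unfold check_plate_match
  exact pvFoldInfl _ _ (fun acc plate _ => pvA_infl ocr_text plate acc) 0

-- each level of B's fold is inflationary in the accumulator
theorem pvB_kfold_infl (ocr_text plate : String) (i acc : Int) :
    acc ≤ (PySem.List.pyRange 0 (PySem.Str.len plate) 1).foldl (fun best k =>
      max best (pvCpl (PySem.List.slice ocr_text.toList (some i) none)
                      (PySem.List.slice plate.toList (some k) none))) acc :=
  pvFoldInfl _ _ (fun acc' k _ => le_max_left _ _) acc

theorem pvB_infl (ocr_text plate : String) (acc : Int) :
    acc ≤ (PySem.List.pyRange 0 (PySem.Str.len ocr_text) 1).foldl (fun best i =>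
      (PySem.List.pyRange 0 (PySem.Str.len plate) 1).foldl (fun best k =>
        max best (pvCpl (PySem.List.slice ocr_text.toList (some i) none)
                        (PySem.List.slice plate.toList (some k) none))) best) acc :=
  pvFoldInfl _ _ (fun acc' i _ => pvB_kfold_infl ocr_text plate i acc') acc

theorem pvB_nonneg (ocr_text : String) (known_plates : List String) :
    0 ≤ check_plate_match_alt ocr_text known_plates := by
  unfold check_plate_match_alt
  exact pvFoldInfl _ _ (fun acc plate _ => pvB_infl ocr_text plate acc) 0

-- KEY 1: any substring of ocr_text contained in a known plate bounds B's result from below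
theorem pvKey1 (ocr_text : String) (known_plates : List String) (plate : String)
    (hp : plate ∈ known_plates) (a b : Nat) (hab : a ≤ b) (hb : b < ocr_text.toList.length)
    (hin : PySem.Str.isIn (PySem.Str.slice ocr_text (some (a : Int)) (some ((b : Int) + 1))) plate = true) :
    PySem.Str.len (PySem.Str.slice ocr_text (some (a : Int)) (some ((b : Int) + 1)))
      ≤ check_plate_match_alt ocr_text known_plates := by
  have hsub : (PySem.Str.slice ocr_text (some (a : Int)) (some ((b : Int) + 1))).toList
      = (ocr_text.toList.drop a).take (b + 1 - a) := pv_subList ocr_text a b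
  have hlen : PySem.Str.len (PySem.Str.slice ocr_text (some (a : Int)) (some ((b : Int) + 1)))
      = ((b + 1 - a : Nat) : Int) := by
    rw [PySem.Str.len_eq, hsub]
    simp only [List.length_take, List.length_drop]
    congr 1
    omega
  rw [hlen]
  have hinf : (ocr_text.toList.drop a).take (b + 1 - a) <:+: plate.toList := by
    rw [← hsub]
    exact (PySem.Str.isIn_iff_infix _ _).mp hin
  obtain ⟨k, hkb, hkt⟩ := pv_infix_drop hinf
  have hLq : ((ocr_text.toList.drop a).take (b + 1 - a)).length = b + 1 - a := by
    simp only [List.length_take, List.length_drop]; omega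
  rw [hLq] at hkb hkt
  have hcpl : ((b + 1 - a : Nat) : Int) ≤ pvCpl (ocr_text.toList.drop a) (plate.toList.drop k) := by
    apply pvCpl_lower (b + 1 - a) _ _ (by simp only [List.length_drop]; omega)
      (by simp only [List.length_drop]; omega)
    rw [hkt]
  have hkq : k < plate.toList.length := by omega
  -- thread the bound through B's three folds
  unfold check_plate_match_alt
  apply pvFoldMem _ _ (fun acc p _ => pvB_infl ocr_text p acc) hp
  intro acc
  apply pvFoldMem _ _ (fun acc' i _ => pvB_kfold_infl ocr_text plate i acc') (x := (a : Int))
  · rw [PySem.List.mem_pyRange_one, PySem.Str.len_eq]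
    constructor
    · positivity
    · exact_mod_cast (by omega : a < ocr_text.toList.length)
  · intro acc'
    apply pvFoldMem _ _ (fun acc'' kk _ => le_max_left _ _) (x := (k : Int))
    · rw [PySem.List.mem_pyRange_one, PySem.Str.len_eq]
      constructor
      · positivity
      · exact_mod_cast hkq
    · intro acc''
      refine le_trans ?_ (le_max_right _ _)
      rw [PySem.List.slice_from _ (by positivity), PySem.List.slice_from _ (by positivity)]
      simpa using hcpl

-- KEY 2: any common prefix of suffixes is realised as a substring that A tests positively
theorem pvKey2 (ocr_text : String) (known_plates : List String) (plate : String)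
    (hp : plate ∈ known_plates) (a k : Nat) (ha : a < ocr_text.toList.length)
    (hk : k < plate.toList.length) :
    pvCpl (ocr_text.toList.drop a) (plate.toList.drop k)
      ≤ check_plate_match ocr_text known_plates := by
  have hc0 : 0 ≤ pvCpl (ocr_text.toList.drop a) (plate.toList.drop k) := pvCpl_nonneg _ _
  rcases eq_or_lt_of_le hc0 with hz | hpos
  · rw [← hz]; exact pvA_nonneg ocr_text known_plates
  have hbounds := pvCpl_le_lengths (ocr_text.toList.drop a) (plate.toList.drop k)
  have hlt := hbounds.1
  have hlq := hbounds.2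
  simp only [List.length_drop] at hlt hlq
  -- name the common-prefix length L
  obtain ⟨L, hcL⟩ : ∃ L : Nat, pvCpl (ocr_text.toList.drop a) (plate.toList.drop k) = (L : Int) :=
    ⟨_, (Int.toNat_of_nonneg hc0).symm⟩
  rw [hcL]
  rw [hcL] at hlt hlq hpos
  have hL1 : 1 ≤ L := by exact_mod_cast hpos
  have hLt : L ≤ ocr_text.toList.length - a := by omega
  have hLq : L ≤ plate.toList.length - k := by omega
  have hbn : a + L - 1 < ocr_text.toList.length := by omega
  have hLb : (a + L - 1) + 1 - a = L := by omega
  have htake : (ocr_text.toList.drop a).take L = (plate.toList.drop k).take L := by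
    have h2 := pvCpl_take_eq (ocr_text.toList.drop a) (plate.toList.drop k)
    rwa [hcL, Int.toNat_natCast] at h2
  have hsub : (PySem.Str.slice ocr_text (some (a : Int)) (some (((a + L - 1 : Nat) : Int) + 1))).toList
      = (ocr_text.toList.drop a).take L := by rw [pv_subList ocr_text a (a + L - 1), hLb]
  have hin : PySem.Str.isIn (PySem.Str.slice ocr_text (some (a : Int)) (some (((a + L - 1 : Nat) : Int) + 1))) plate = true := by
    rw [PySem.Str.isIn_iff_infix, hsub, htake]
    exact pv_drop_take_infix plate.toList k L _ rfl
  have hlen : PySem.Str.len (PySem.Str.slice ocr_text (some (a : Int)) (some (((a + L - 1 : Nat) : Int) + 1)))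
      = (L : Int) := by
    rw [PySem.Str.len_eq, hsub]
    simp only [List.length_take, List.length_drop]
    congr 1
    omega
  -- thread the bound through A's three folds
  unfold check_plate_match
  apply pvFoldMem _ _ (fun acc p _ => pvA_infl ocr_text p acc) hp
  intro acc
  apply pvFoldMem _ _ (fun acc' i _ => pvA_jfold_infl ocr_text plate i acc') (x := (a : Int))
  · rw [PySem.List.mem_pyRange_one, PySem.Str.len_eq]
    constructor
    · positivity
    · exact_mod_cast ha
  · intro acc'
    apply pvFoldMem _ _ (fun acc'' j _ => pvA_step_infl ocr_text plate (a : Int) j acc'')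
        (x := ((a + L - 1 : Nat) : Int))
    · rw [PySem.List.mem_pyRange_one, PySem.Str.len_eq]
      constructor
      · exact_mod_cast (by omega : a ≤ a + L - 1)
      · exact_mod_cast hbn
    · intro acc''
      dsimp only
      rw [hlen]
      split_ifs with h
      · exact le_refl _
      · rcases not_and_or.mp h with h1 | h2
        · exact absurd hin h1
        · omega

-- ===== MAIN PROOF =====
theorem pv_main (ocr_text : String) (known_plates : List String) :
    check_plate_match ocr_text known_plates = check_plate_match_alt ocr_text known_plates := by
  apply le_antisymm
  · -- A ≤ B
    unfold check_plate_match
    apply pvFoldLe _ _ _ ?_ 0 (pvB_nonneg ocr_text known_plates)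
    intro acc plate hp hacc
    apply pvFoldLe _ _ _ ?_ acc hacc
    intro acc' i hi hacc'
    apply pvFoldLe _ _ _ ?_ acc' hacc'
    intro acc'' j hj hacc''
    dsimp only
    split_ifs with h
    · rw [PySem.List.mem_pyRange_one] at hi hj
      have h0i : 0 ≤ i := hi.1
      have hij : i ≤ j := hj.1
      have hjn : j < PySem.Str.len ocr_text := hj.2
      rw [PySem.Str.len_eq] at hjn
      have ha : i = ((i.toNat : Nat) : Int) := by omega
      have hb : j = ((j.toNat : Nat) : Int) := by omega
      rw [ha, hb] at h ⊢
      exact pvKey1 ocr_text known_plates plate hp i.toNat j.toNat (by omega) (by omega) h.1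
    · exact hacc''
  · -- B ≤ A
    unfold check_plate_match_alt
    apply pvFoldLe _ _ _ ?_ 0 (pvA_nonneg ocr_text known_plates)
    intro acc plate hp hacc
    apply pvFoldLe _ _ _ ?_ acc hacc
    intro acc' i hi hacc'
    apply pvFoldLe _ _ _ ?_ acc' hacc'
    intro acc'' k hk hacc''
    apply max_le hacc''
    rw [PySem.List.mem_pyRange_one] at hi hk
    have h0i : 0 ≤ i := hi.1
    have h0k : 0 ≤ k := hk.1
    have hin : i < PySem.Str.len ocr_text := hi.2
    have hkm : k < PySem.Str.len plate := hk.2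
    rw [PySem.Str.len_eq] at hin hkm
    rw [PySem.List.slice_from _ h0i, PySem.List.slice_from _ h0k]
    exact pvKey2 ocr_text known_plates plate hp i.toNat k.toNat (by omega) (by omega)

-- ===== VERDICT (by name: the statement is the Claim_ definition above) =====
theorem check_plate_match_spec : Claim_equal_check_plate_match := by
  intro ocr_text known_plates _
  unfold Spec_check_plate_match
  exact pv_main ocr_text known_plates
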